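-- pv_equiv track=rewrite | github.com/batsto/home_work003 | task005.py | list_finnabochi
-- ===== SOURCE A (Python) =====
-- def create_finnabochi(n):
--     if n in (1, 2):
--         return 1
--     elif n == 0:
--         return 0
--     return create_finnabochi(n-1) + create_finnabochi(n-2)
--
-- def list_finnabochi(a):
--     result = []
--     end_result =[]
--     n = 0
--     for i in range(0, a):
--         n = create_finnabochi(i)
--         result.append(n)
--     for i in result:
--         i *= -1
--         end_result.append(i)
--     return end_result[::-1] + result
-- ===== SOURCE B (Python) =====
-- def list_finnabochi(a):
--     fibs = []
--     x, y = 0, 1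
--     for _ in range(a if a > 0 else 0):
--         fibs.append(x)
--         x, y = y, x + y
--     return [-v for v in reversed(fibs)] + fibs
-- ===== Notes on version B (the rewrite author's own statement) =====
-- stated objective: faster
-- what changed: Replaces the naive exponential recursive Fibonacci called once per index by a single iterative pass maintaining the pair (x, y), and builds the negated reversed half from that one list; intended as asymptotically faster (O(a) vs O(2^a)), though a timing run could not confirm a ratio at the largest size because A times out there.
import Mathlib
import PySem

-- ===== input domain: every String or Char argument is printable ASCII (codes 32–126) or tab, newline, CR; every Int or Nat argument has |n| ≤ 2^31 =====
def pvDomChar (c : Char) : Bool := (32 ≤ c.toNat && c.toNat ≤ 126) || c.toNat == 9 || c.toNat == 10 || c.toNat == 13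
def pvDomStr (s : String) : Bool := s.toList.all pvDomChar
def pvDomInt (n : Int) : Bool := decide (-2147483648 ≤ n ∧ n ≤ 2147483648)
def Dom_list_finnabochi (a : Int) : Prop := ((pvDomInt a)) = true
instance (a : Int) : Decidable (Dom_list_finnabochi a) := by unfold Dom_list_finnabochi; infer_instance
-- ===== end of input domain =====

-- B replaces the per-index recursive Fibonacci by one iterative pass; intended as asymptotically faster (a timing run could not confirm a ratio: A times out on larger inputs); return value equivalence.

-- ===== PORT A =====
-- create_finnabochi: only ever called on the non-negative ints of range(0, a);
-- transcribed as structural recursion on Nat with the same branch order/values.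
def createFinnabochi : Nat → Int
  | 1 => 1
  | 2 => 1
  | 0 => 0
  | (n+3) => createFinnabochi (n+2) + createFinnabochi (n+1)

def list_finnabochi (a : Int) : List Int :=
  let result := (PySem.List.pyRange 0 a 1).foldl (fun acc i => acc ++ [createFinnabochi i.toNat]) []
  let end_result := result.foldl (fun acc i => acc ++ [i * (-1)]) []
  -- end_result[::-1] is exactly List.reverse
  end_result.reverse ++ result

-- ===== PORT B =====
def fibAcc : Nat → Int → Int → List Int
  | 0, _, _ => []
  | (n+1), x, y => x :: fibAcc n y (x + y)

def list_finnabochi_alt (a : Int) : List Int :=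
  let fibs := fibAcc a.toNat 0 1
  fibs.reverse.map (fun v => -v) ++ fibs

-- ===== PRECONDITION & SPEC =====
def Spec_list_finnabochi (a : Int) (out : List Int) : Prop := out = list_finnabochi_alt a
instance (a : Int) (out : List Int) : Decidable (Spec_list_finnabochi a out) := by unfold Spec_list_finnabochi; infer_instance

-- ===== CLAIM (what is proved, stated in full; the proofs are below) =====
def Claim_equal_list_finnabochi : Prop := ∀ (a : Int), Dom_list_finnabochi a → Spec_list_finnabochi a (list_finnabochi a)

-- ===== LEMMAS AND PROOFS =====

theorem createFin_add_two (k : Nat) :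
    createFinnabochi (k + 2) = createFinnabochi k + createFinnabochi (k + 1) := by
  match k with
  | 0 => decide
  | (n+1) => simp [createFinnabochi]; ring

theorem fibAcc_eq_map (n k : Nat) :
    fibAcc n (createFinnabochi k) (createFinnabochi (k + 1)) =
      (List.range n).map (fun i => createFinnabochi (k + i)) := by
  induction n generalizing k with
  | zero => simp [fibAcc]
  | succ m ih =>
    have h : createFinnabochi k + createFinnabochi (k + 1) = createFinnabochi (k + 1 + 1) := by
      rw [createFin_add_two]
    rw [List.range_succ_eq_map, List.map_cons, List.map_map]
    simp only [fibAcc, h, ih (k + 1)]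
    congr 1
    simp
    intro i _
    congr 1
    omega

theorem foldl_append_singleton {α β : Type} (f : α → β) (l : List α) (acc : List β) :
    l.foldl (fun acc i => acc ++ [f i]) acc = acc ++ l.map f := by
  induction l generalizing acc with
  | nil => simp
  | cons x xs ih => simp [List.foldl, ih]

-- ===== VERDICT (by name: the statement is the Claim_ definition above) =====
theorem list_finnabochi_spec : Claim_equal_list_finnabochi := by
  intro a _
  unfold Spec_list_finnabochi list_finnabochi list_finnabochi_alt
  simp only [foldl_append_singleton, List.nil_append]
  have hrange : PySem.List.pyRange 0 a 1 = (List.range a.toNat).map (fun k : Nat => (k : Int)) := by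
    rw [PySem.List.pyRange_one]
    simp
  have hfibs : fibAcc a.toNat 0 1 = (List.range a.toNat).map createFinnabochi := by
    have h := fibAcc_eq_map a.toNat 0
    simpa [createFinnabochi] using h
  rw [hrange, hfibs]
  simp only [List.map_map, List.map_reverse]
  congr 1
  · congr 1
    apply List.map_congr_left; intro k _; simp [Function.comp]
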